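-- pv_equiv track=rewrite | github.com/sergeig916-blip/CAMP | bot.py | get_service_name
-- ===== SOURCE A (Python) =====
-- CAMP_SHIFTS = [
--     {"name": "смена 1", "dates": "01.06-12.06", "id": "camp_10_days_1"},
--     {"name": "смена 2", "dates": "15.06-26.06", "id": "camp_10_days_2"},
--     {"name": "смена 3", "dates": "29.06-10.07", "id": "camp_10_days_3"},
--     {"name": "смена 4", "dates": "13.07-24.07", "id": "camp_10_days_4"},
--     {"name": "смена 5", "dates": "27.07-07.08", "id": "camp_10_days_5"},
--     {"name": "смена 6", "dates": "10.08-21.08", "id": "camp_10_days_6"},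
--     {"name": "смена 7", "dates": "24.08-28.08", "id": "camp_10_days_7"}
-- ]
--
-- TRAINING_SERVICES = [
--     {"name": "тренировка - 1 шт", "price": 1600, "id": "training_1"},
--     {"name": "абонемент - 5 занятий", "price": 7000, "price_per": 1400, "id": "training_5"},
--     {"name": "абонемент - 10 занятий", "price": 11500, "price_per": 1150, "id": "training_10"}
-- ]
--
-- OTHER_SERVICES = [
--     {"name": "оплата после \"пробного дня\"", "price": 39000, "id": "trial_day"},
--     {"name": "форма", "price": 4500, "id": "uniform"},
--     {"name": "📝 Индивидуальные условия", "price": 0, "id": "individual"}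
-- ]
--
-- SOCHI_CATEGORIES = [
--     {
--         "name": "«Спортсмен» (без сопровождения)",
--         "id": "sochi_sportsman",
--         "options": [
--             {"name": "Смена МАЙ 02-08", "price": 89990, "id": "sochi_sportsman_may"},
--             {"name": "Смена ИЮНЬ 19-27", "price": 114990, "id": "sochi_sportsman_june"},
--             {"name": "Смена ИЮЛЬ 4-11", "price": 102490, "id": "sochi_sportsman_july"},
--             {"name": "Смена АВГУСТ 1-8", "price": 102490, "id": "sochi_sportsman_august"}
--         ]
--     },
--     {
--         "name": "«Спортсмен + родитель»",
--         "id": "sochi_family",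
--         "options": [
--             {"name": "Смена МАЙ 02-08", "price": 139990, "id": "sochi_family_may"},
--             {"name": "Смена ИЮНЬ 19-27", "price": 183990, "id": "sochi_family_june"},
--             {"name": "Смена ИЮЛЬ 4-11", "price": 161990, "id": "sochi_family_july"},
--             {"name": "Смена АВГУСТ 1-8", "price": 161990, "id": "sochi_family_august"}
--         ]
--     },
--     {
--         "name": "«Сопровождающий» (любой участник не принимающий участия в тренировках)",
--         "id": "sochi_accompanist",
--         "options": [
--             {"name": "Смена МАЙ 02-08", "price": 59990, "id": "sochi_accompanist_may"},
--             {"name": "Смена ИЮНЬ 19-27", "price": 77990, "id": "sochi_accompanist_june"},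
--             {"name": "Смена ИЮЛЬ 4-11", "price": 68990, "id": "sochi_accompanist_july"},
--             {"name": "Смена АВГУСТ 1-8", "price": 68990, "id": "sochi_accompanist_august"}
--         ]
--     }
-- ]
--
-- def get_service_name(service_id: str, camp_id: str = None) -> str:
--     """Получает название услуги по ID"""
--     # Проверяем смены
--     for shift in CAMP_SHIFTS:
--         if shift["id"] == service_id:
--             return f"10 дней {shift['name']} ({shift['dates']})"
--
--     # Проверяем тренировки
--     for s in TRAINING_SERVICES:
--         if s["id"] == service_id:
--             return s["name"]
--
--     # Проверяем прочее
--     for s in OTHER_SERVICES: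
--         if s["id"] == service_id:
--             return s["name"]
--
--     # Проверяем специальную услугу Сочи
--     if service_id == "sochi_trip":
--         return "🏕️ Поездка в Сочи"
--
--     # Проверяем индивидуальные условия
--     if service_id == "individual":
--         return "📝 Индивидуальные условия"
--
--     # Проверяем старые категории Сочи (для совместимости)
--     for cat in SOCHI_CATEGORIES:
--         for opt in cat["options"]:
--             if opt["id"] == service_id:
--                 return f"{cat['name']} - {opt['name']}"
--
--     return service_id
-- ===== SOURCE B (Python) =====
-- # Precomputed flat lookup table: every service id mapped straight to its final
-- # display string, so the function is a single dict lookup with the id as fallback.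
-- SERVICE_NAMES = {
--     'camp_10_days_1': '10 дней смена 1 (01.06-12.06)',
--     'camp_10_days_2': '10 дней смена 2 (15.06-26.06)',
--     'camp_10_days_3': '10 дней смена 3 (29.06-10.07)',
--     'camp_10_days_4': '10 дней смена 4 (13.07-24.07)',
--     'camp_10_days_5': '10 дней смена 5 (27.07-07.08)',
--     'camp_10_days_6': '10 дней смена 6 (10.08-21.08)',
--     'camp_10_days_7': '10 дней смена 7 (24.08-28.08)',
--     'training_1': 'тренировка - 1 шт',
--     'training_5': 'абонемент - 5 занятий',
--     'training_10': 'абонемент - 10 занятий',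
--     'trial_day': 'оплата после "пробного дня"',
--     'uniform': 'форма',
--     'individual': '📝 Индивидуальные условия',
--     'sochi_trip': '🏕️ Поездка в Сочи',
--     'sochi_sportsman_may': '«Спортсмен» (без сопровождения) - Смена МАЙ 02-08',
--     'sochi_sportsman_june': '«Спортсмен» (без сопровождения) - Смена ИЮНЬ 19-27',
--     'sochi_sportsman_july': '«Спортсмен» (без сопровождения) - Смена ИЮЛЬ 4-11',
--     'sochi_sportsman_august': '«Спортсмен» (без сопровождения) - Смена АВГУСТ 1-8',
--     'sochi_family_may': '«Спортсмен + родитель» - Смена МАЙ 02-08',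
--     'sochi_family_june': '«Спортсмен + родитель» - Смена ИЮНЬ 19-27',
--     'sochi_family_july': '«Спортсмен + родитель» - Смена ИЮЛЬ 4-11',
--     'sochi_family_august': '«Спортсмен + родитель» - Смена АВГУСТ 1-8',
--     'sochi_accompanist_may': '«Сопровождающий» (любой участник не принимающий участия в тренировках) - Смена МАЙ 02-08',
--     'sochi_accompanist_june': '«Сопровождающий» (любой участник не принимающий участия в тренировках) - Смена ИЮНЬ 19-27',
--     'sochi_accompanist_july': '«Сопровождающий» (любой участник не принимающий участия в тренировках) - Смена ИЮЛЬ 4-11',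
--     'sochi_accompanist_august': '«Сопровождающий» (любой участник не принимающий участия в тренировках) - Смена АВГУСТ 1-8'
-- }
--
--
-- def get_service_name(service_id: str, camp_id: str = None) -> str:
--     """Получает название услуги по ID"""
--     return SERVICE_NAMES.get(service_id, service_id)
-- ===== Notes on version B (the rewrite author's own statement) =====
-- stated objective: idiomatic
-- what changed: Replaces A's per-call sequence of linear scans (three service lists, two special-case ifs, and a nested category/option scan) with a precomputed flat id->display-name dictionary, so each call is a single dict lookup with the raw id as default.
import Mathlib
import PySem

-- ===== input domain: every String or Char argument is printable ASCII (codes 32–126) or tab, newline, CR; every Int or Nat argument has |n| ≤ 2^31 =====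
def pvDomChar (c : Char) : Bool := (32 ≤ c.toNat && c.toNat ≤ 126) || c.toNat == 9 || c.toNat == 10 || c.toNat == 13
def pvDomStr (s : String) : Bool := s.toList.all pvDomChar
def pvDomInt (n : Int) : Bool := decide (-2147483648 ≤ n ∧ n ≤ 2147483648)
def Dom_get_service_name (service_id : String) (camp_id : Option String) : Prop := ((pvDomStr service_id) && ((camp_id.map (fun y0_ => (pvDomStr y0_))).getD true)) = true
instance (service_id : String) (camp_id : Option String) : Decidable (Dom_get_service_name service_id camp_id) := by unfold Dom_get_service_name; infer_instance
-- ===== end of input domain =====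

-- B replaces A's per-call chain of list scans over the raw config lists by a
-- precomputed flat id -> display-name table and a single lookup (idiomatic).

-- ===== PORT A =====
-- module constants (name, dates, id) / (name, price, id); prices kept for fidelity though unused by the function
def pvCampShifts : List (String × String × String) :=
  [("смена 1", "01.06-12.06", "camp_10_days_1"),
   ("смена 2", "15.06-26.06", "camp_10_days_2"),
   ("смена 3", "29.06-10.07", "camp_10_days_3"),
   ("смена 4", "13.07-24.07", "camp_10_days_4"),
   ("смена 5", "27.07-07.08", "camp_10_days_5"),
   ("смена 6", "10.08-21.08", "camp_10_days_6"),
   ("смена 7", "24.08-28.08", "camp_10_days_7")]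

def pvTrainingServices : List (String × Int × String) :=
  [("тренировка - 1 шт", 1600, "training_1"),
   ("абонемент - 5 занятий", 7000, "training_5"),
   ("абонемент - 10 занятий", 11500, "training_10")]

def pvOtherServices : List (String × Int × String) :=
  [("оплата после \"пробного дня\"", 39000, "trial_day"),
   ("форма", 4500, "uniform"),
   ("📝 Индивидуальные условия", 0, "individual")]

def pvSochiCategories : List (String × List (String × Int × String)) :=
  [("«Спортсмен» (без сопровождения)",
    [("Смена МАЙ 02-08", 89990, "sochi_sportsman_may"),
     ("Смена ИЮНЬ 19-27", 114990, "sochi_sportsman_june"),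
     ("Смена ИЮЛЬ 4-11", 102490, "sochi_sportsman_july"),
     ("Смена АВГУСТ 1-8", 102490, "sochi_sportsman_august")]),
   ("«Спортсмен + родитель»",
    [("Смена МАЙ 02-08", 139990, "sochi_family_may"),
     ("Смена ИЮНЬ 19-27", 183990, "sochi_family_june"),
     ("Смена ИЮЛЬ 4-11", 161990, "sochi_family_july"),
     ("Смена АВГУСТ 1-8", 161990, "sochi_family_august")]),
   ("«Сопровождающий» (любой участник не принимающий участия в тренировках)",
    [("Смена МАЙ 02-08", 59990, "sochi_accompanist_may"),
     ("Смена ИЮНЬ 19-27", 77990, "sochi_accompanist_june"),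
     ("Смена ИЮЛЬ 4-11", 68990, "sochi_accompanist_july"),
     ("Смена АВГУСТ 1-8", 68990, "sochi_accompanist_august")])]

-- A's first loop: for shift in CAMP_SHIFTS: if id matches, return formatted string
def pvShiftLoop (sid : String) : List (String × String × String) → Option String
  | [] => none
  | (name, dates, id) :: rest =>
      if id == sid then some ("10 дней " ++ name ++ " (" ++ dates ++ ")")
      else pvShiftLoop sid rest

-- A's second/third loops: for s in <services>: if id matches, return s["name"]
def pvServiceLoop (sid : String) : List (String × Int × String) → Option String
  | [] => none
  | (name, _, id) :: rest =>
      if id == sid then some name else pvServiceLoop sid rest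

-- A's nested loop over SOCHI_CATEGORIES options
def pvSochiLoop (sid : String) : List (String × List (String × Int × String)) → Option String
  | [] => none
  | (catName, opts) :: rest =>
      match pvServiceLoop sid opts with
      | some optName => some (catName ++ " - " ++ optName)
      | none => pvSochiLoop sid rest

def get_service_name (service_id : String) (_camp_id : Option String) : String :=
  match pvShiftLoop service_id pvCampShifts with
  | some r => r
  | none =>
    match pvServiceLoop service_id pvTrainingServices with
    | some r => r
    | none =>
      match pvServiceLoop service_id pvOtherServices with
      | some r => r
      | none =>
        if service_id == "sochi_trip" then "🏕️ Поездка в Сочи"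
        else if service_id == "individual" then "📝 Индивидуальные условия"
        else
          match pvSochiLoop service_id pvSochiCategories with
          | some r => r
          | none => service_id

-- ===== PORT B =====
-- Source B's SERVICE_NAMES: a precomputed literal dict, each id already paired with its final display string
def pvServiceNames : PySem.Dict String String := PySem.Dict.mk
  [   ("camp_10_days_1", "10 дней смена 1 (01.06-12.06)"),
   ("camp_10_days_2", "10 дней смена 2 (15.06-26.06)"),
   ("camp_10_days_3", "10 дней смена 3 (29.06-10.07)"),
   ("camp_10_days_4", "10 дней смена 4 (13.07-24.07)"),
   ("camp_10_days_5", "10 дней смена 5 (27.07-07.08)"),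
   ("camp_10_days_6", "10 дней смена 6 (10.08-21.08)"),
   ("camp_10_days_7", "10 дней смена 7 (24.08-28.08)"),
   ("training_1", "тренировка - 1 шт"),
   ("training_5", "абонемент - 5 занятий"),
   ("training_10", "абонемент - 10 занятий"),
   ("trial_day", "оплата после \"пробного дня\""),
   ("uniform", "форма"),
   ("individual", "📝 Индивидуальные условия"),
   ("sochi_trip", "🏕️ Поездка в Сочи"),
   ("sochi_sportsman_may", "«Спортсмен» (без сопровождения) - Смена МАЙ 02-08"),
   ("sochi_sportsman_june", "«Спортсмен» (без сопровождения) - Смена ИЮНЬ 19-27"),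
   ("sochi_sportsman_july", "«Спортсмен» (без сопровождения) - Смена ИЮЛЬ 4-11"),
   ("sochi_sportsman_august", "«Спортсмен» (без сопровождения) - Смена АВГУСТ 1-8"),
   ("sochi_family_may", "«Спортсмен + родитель» - Смена МАЙ 02-08"),
   ("sochi_family_june", "«Спортсмен + родитель» - Смена ИЮНЬ 19-27"),
   ("sochi_family_july", "«Спортсмен + родитель» - Смена ИЮЛЬ 4-11"),
   ("sochi_family_august", "«Спортсмен + родитель» - Смена АВГУСТ 1-8"),
   ("sochi_accompanist_may", "«Сопровождающий» (любой участник не принимающий участия в тренировках) - Смена МАЙ 02-08"),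
   ("sochi_accompanist_june", "«Сопровождающий» (любой участник не принимающий участия в тренировках) - Смена ИЮНЬ 19-27"),
   ("sochi_accompanist_july", "«Сопровождающий» (любой участник не принимающий участия в тренировках) - Смена ИЮЛЬ 4-11"),
   ("sochi_accompanist_august", "«Сопровождающий» (любой участник не принимающий участия в тренировках) - Смена АВГУСТ 1-8")]

def get_service_name_alt (service_id : String) (_camp_id : Option String) : String :=
  pvServiceNames.getD service_id service_id

-- ===== PRECONDITION & SPEC =====
def Spec_get_service_name (service_id : String) (camp_id : Option String) (out : String) : Prop := out = get_service_name_alt service_id camp_id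
instance (service_id : String) (camp_id : Option String) (out : String) : Decidable (Spec_get_service_name service_id camp_id out) := by unfold Spec_get_service_name; infer_instance

-- ===== CLAIM (what is proved, stated in full; the proofs are below) =====
def Claim_equal_get_service_name : Prop := ∀ (service_id : String) (camp_id : Option String), Dom_get_service_name service_id camp_id → Spec_get_service_name service_id camp_id (get_service_name service_id camp_id)

-- ===== LEMMAS AND PROOFS =====
def pvAllIds : List String :=
  [   "camp_10_days_1",
   "camp_10_days_2",
   "camp_10_days_3",
   "camp_10_days_4",
   "camp_10_days_5",
   "camp_10_days_6",
   "camp_10_days_7",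
   "training_1",
   "training_5",
   "training_10",
   "trial_day",
   "uniform",
   "individual",
   "sochi_trip",
   "sochi_sportsman_may",
   "sochi_sportsman_june",
   "sochi_sportsman_july",
   "sochi_sportsman_august",
   "sochi_family_may",
   "sochi_family_june",
   "sochi_family_july",
   "sochi_family_august",
   "sochi_accompanist_may",
   "sochi_accompanist_june",
   "sochi_accompanist_july",
   "sochi_accompanist_august"]

set_option maxRecDepth 100000 in
theorem pv_eq (service_id : String) (camp_id : Option String) :
    get_service_name service_id camp_id = get_service_name_alt service_id camp_id := by
  by_cases hmem : service_id ∈ pvAllIds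
  · simp only [pvAllIds, List.mem_cons, List.not_mem_nil, or_false] at hmem
    rcases hmem with rfl|rfl|rfl|rfl|rfl|rfl|rfl|rfl|rfl|rfl|rfl|rfl|rfl|rfl|rfl|rfl|rfl|rfl|rfl|rfl|rfl|rfl|rfl|rfl|rfl|rfl <;> rfl
  · simp only [pvAllIds, List.mem_cons, List.not_mem_nil, or_false, not_or] at hmem
    obtain ⟨h1,h2,h3,h4,h5,h6,h7,h8,h9,h10,h11,h12,h13,h14,h15,h16,h17,h18,h19,h20,h21,h22,h23,h24,h25,h26⟩ := hmem
    simp [get_service_name, get_service_name_alt, pvServiceNames,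
      pvCampShifts, pvTrainingServices, pvOtherServices, pvSochiCategories,
      pvShiftLoop, pvServiceLoop, pvSochiLoop,
      PySem.Dict.getD_eq_get?_getD, PySem.Dict.get?,
      Ne.symm h1, Ne.symm h2, Ne.symm h3, Ne.symm h4, Ne.symm h5, Ne.symm h6, Ne.symm h7, Ne.symm h8, Ne.symm h9, Ne.symm h10, Ne.symm h11, Ne.symm h12, Ne.symm h13, Ne.symm h14, Ne.symm h15, Ne.symm h16, Ne.symm h17, Ne.symm h18, Ne.symm h19, Ne.symm h20, Ne.symm h21, Ne.symm h22, Ne.symm h23, Ne.symm h24, Ne.symm h25, Ne.symm h26, h13, h14]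

-- ===== VERDICT (by name: the statement is the Claim_ definition above) =====
theorem get_service_name_spec : Claim_equal_get_service_name := by
  intro s c _
  exact pv_eq s c
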